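-- pv_equiv track=rewrite | github.com/key-moon/golf | deflate_optimizer.py | _length_to_code_and_extra_for_dump
-- ===== SOURCE A (Python) =====
-- from typing import List, Sequence, Tuple, Dict, Optional, Callable, Iterable
--
-- LEN_BASES = [
--     3,4,5,6,7,8,9,10,11,13,15,17,19,23,27,31,
--     35,43,51,59,67,83,99,115,131,163,195,227,258
-- ]
--
-- LEN_EXTRA = [
--     0,0,0,0,0,0,0,0,1,1,1,1,2,2,2,2,
--     3,3,3,3,4,4,4,4,5,5,5,5,0
-- ]
--
-- def _length_to_code_and_extra_for_dump(length: int) -> Tuple[int,int,int]: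
--     if length < 3 or length > 258:
--         raise ValueError("length out of range")
--     if length == 258:
--         return 285, 0, 0
--     for i in range(len(LEN_BASES)-1):
--         base = LEN_BASES[i]; nextb = LEN_BASES[i+1]
--         if base <= length < nextb:
--             return 257 + i, length - base, LEN_EXTRA[i]
--     return 285, 0, 0
-- ===== SOURCE B (Python) =====
-- from typing import Tuple
--
-- LEN_BASES = [
--     3,4,5,6,7,8,9,10,11,13,15,17,19,23,27,31,
--     35,43,51,59,67,83,99,115,131,163,195,227,258
-- ]
--
-- LEN_EXTRA = [
--     0,0,0,0,0,0,0,0,1,1,1,1,2,2,2,2,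
--     3,3,3,3,4,4,4,4,5,5,5,5,0
-- ]
--
-- def _length_to_code_and_extra_for_dump(length: int) -> Tuple[int,int,int]:
--     if length < 3 or length > 258:
--         raise ValueError("length out of range")
--     # binary search for the rightmost base <= length (hand-rolled bisect_right)
--     lo, hi = 0, len(LEN_BASES)
--     while lo < hi:
--         mid = (lo + hi) // 2
--         if LEN_BASES[mid] <= length:
--             lo = mid + 1
--         else:
--             hi = mid
--     i = lo - 1
--     return 257 + i, length - LEN_BASES[i], LEN_EXTRA[i]
-- ===== Notes on version B (the rewrite author's own statement) =====
-- stated objective: alternative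
-- what changed: Replaces the sequential scan over LEN_BASES (and the separate length==258 special case) with a hand-rolled bisect_right binary search that subsumes the 258 case.
import Mathlib
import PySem

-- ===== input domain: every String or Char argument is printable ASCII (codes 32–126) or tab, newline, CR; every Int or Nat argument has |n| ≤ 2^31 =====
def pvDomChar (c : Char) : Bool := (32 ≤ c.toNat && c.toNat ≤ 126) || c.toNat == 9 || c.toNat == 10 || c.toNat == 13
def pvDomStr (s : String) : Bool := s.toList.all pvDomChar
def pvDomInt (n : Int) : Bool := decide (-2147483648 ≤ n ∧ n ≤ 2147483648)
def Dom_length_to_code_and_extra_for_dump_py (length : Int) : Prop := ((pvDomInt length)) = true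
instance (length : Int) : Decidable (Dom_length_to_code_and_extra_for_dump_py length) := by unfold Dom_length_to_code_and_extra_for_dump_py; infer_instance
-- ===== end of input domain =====

-- B replaces A's sequential table scan (plus the 258 special case) with a binary search; same values on 3..258.


def lenBases : List Int := [3,4,5,6,7,8,9,10,11,13,15,17,19,23,27,31,35,43,51,59,67,83,99,115,131,163,195,227,258]
def lenExtra : List Int := [0,0,0,0,0,0,0,0,1,1,1,1,2,2,2,2,3,3,3,3,4,4,4,4,5,5,5,5,0]

-- ===== PORT A =====
-- A's for-loop over range(len(LEN_BASES)-1): recursion on the number of remaining iterations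
-- (k iterations remain; the current index is i = 28 - k).
def loopA (length : Int) : Nat → Int × Int × Int
  | 0 => (285, 0, 0)
  | Nat.succ k =>
    let i := 28 - Nat.succ k
    let base := lenBases.getD i 0
    let nextb := lenBases.getD (i+1) 0
    if base ≤ length ∧ length < nextb then (257 + (i : Int), length - base, lenExtra.getD i 0)
    else loopA length k

def length_to_code_and_extra_for_dump_py (length : Int) : Int × Int × Int :=
  -- the 'length < 3 or length > 258' raise is excluded by Pre_
  if length = 258 then (285, 0, 0)
  else loopA length 28

-- ===== PORT B =====
-- B's hand-rolled bisect_right while-loop.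
-- fuel = hi - lo at entry suffices for the while-loop (each step shrinks the interval).
def bsearchB (length : Int) : Nat → Nat → Nat → Nat
  | 0, lo, _ => lo
  | Nat.succ fuel, lo, hi =>
    if lo < hi then
      let mid := (lo + hi) / 2
      if lenBases.getD mid 0 ≤ length then bsearchB length fuel (mid + 1) hi
      else bsearchB length fuel lo mid
    else lo

def length_to_code_and_extra_for_dump_py_alt (length : Int) : Int × Int × Int :=
  let i := bsearchB length 29 0 29 - 1
  (257 + (i : Int), length - lenBases.getD i 0, lenExtra.getD i 0)

-- ===== PRECONDITION & SPEC =====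
-- Pre_ excludes exactly the inputs on which A raises ValueError ('length out of range').
def Pre_length_to_code_and_extra_for_dump_py (length : Int) : Prop := 3 ≤ length ∧ length ≤ 258
instance (length : Int) : Decidable (Pre_length_to_code_and_extra_for_dump_py length) := by unfold Pre_length_to_code_and_extra_for_dump_py; infer_instance
def pvWitness_length_to_code_and_extra_for_dump_py : Int := (100)

def Spec_length_to_code_and_extra_for_dump_py (length : Int) (out : Int × Int × Int) : Prop := out = length_to_code_and_extra_for_dump_py_alt length
instance (length : Int) (out : Int × Int × Int) : Decidable (Spec_length_to_code_and_extra_for_dump_py length out) := by unfold Spec_length_to_code_and_extra_for_dump_py; infer_instance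

-- ===== CLAIM (what is proved, stated in full; the proofs are below) =====
def Claim_equal_length_to_code_and_extra_for_dump_py : Prop := ∀ (length : Int), Dom_length_to_code_and_extra_for_dump_py length → Pre_length_to_code_and_extra_for_dump_py length → Spec_length_to_code_and_extra_for_dump_py length (length_to_code_and_extra_for_dump_py length)

-- ===== LEMMAS AND PROOFS =====

-- ===== VERDICT (by name: the statement is the Claim_ definition above) =====
theorem length_to_code_and_extra_for_dump_py_spec : Claim_equal_length_to_code_and_extra_for_dump_py := by
  intro length _ hpre
  obtain ⟨h1, h2⟩ := hpre
  unfold Spec_length_to_code_and_extra_for_dump_py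
  interval_cases length <;> decide
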